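-- pv_equiv track=rewrite | github.com/terry-flander/forms-working | app/lib/formio_api.py | getLogValue
-- ===== SOURCE A (Python) =====
-- def getLogValue(l, fieldName, dflt):
--     result = ''
--     firstChange = ''
--     try:
--         result = l['data'][fieldName]
--     except Exception:
--         result = dflt
--
--     if fieldName == 'logDateTime':
--         result = result[0:19].replace('T',' ')
--     elif fieldName == 'logComment':
--         newresult = ''
--         firstChange = ''
--         for l in result.split("<br"):
--             c = l.replace('>','').split('|')
--             newresult += '<tr><td>'
--             if len(c) == 2:
--               newresult += c[0].strip() + '</td><td>' + c[1].strip()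
--               if firstChange == '':
--                   firstChange = c[1].strip()
--             else:
--               newresult += '</td><td>' + c[0].strip()
--               if firstChange == '':
--                   firstChange = c[0].strip()
--             newresult += '</td></tr>'
--         result = newresult
--     return result, firstChange
-- ===== SOURCE B (Python) =====
-- def getLogValue(l, fieldName, dflt):
--     try:
--         result = l['data'][fieldName]
--     except Exception:
--         result = dflt
--     firstChange = ''
--     if fieldName == 'logDateTime':
--         result = result[0:19].replace('T', ' ')
--     elif fieldName == 'logComment':
--         # cursor scan: no split() calls; find/slice tokenizer + partition per segment
--         rows = []
--         values = []
--         s = result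
--         more = True
--         while more:
--             i = s.find('<br')
--             if i < 0:
--                 seg = s
--                 more = False
--             else:
--                 seg = s[:i]
--                 s = s[i + 3:]
--             head, bar, tail = seg.replace('>', '').partition('|')
--             if bar == '|' and '|' not in tail:
--                 v = tail.strip()
--                 rows.append('<tr><td>' + head.strip() + '</td><td>' + v + '</td></tr>')
--             else:
--                 v = head.strip()
--                 rows.append('<tr><td></td><td>' + v + '</td></tr>')
--             values.append(v)
--         result = ''.join(rows)
--         firstChange = next((v for v in values if v != ''), '')
--     return result, firstChange
-- ===== Notes on version B (the rewrite author's own statement) =====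
-- stated objective: alternative
-- what changed: A splits the comment with str.split and threads the growing HTML and firstChange through one accumulating loop; B never calls split: it tokenizes with a find/slice cursor scan, classifies each segment with partition('|') plus a substring test instead of split-length, collects rows and values, and derives the table by join and firstChange by a separate next() search.
import Mathlib
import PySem

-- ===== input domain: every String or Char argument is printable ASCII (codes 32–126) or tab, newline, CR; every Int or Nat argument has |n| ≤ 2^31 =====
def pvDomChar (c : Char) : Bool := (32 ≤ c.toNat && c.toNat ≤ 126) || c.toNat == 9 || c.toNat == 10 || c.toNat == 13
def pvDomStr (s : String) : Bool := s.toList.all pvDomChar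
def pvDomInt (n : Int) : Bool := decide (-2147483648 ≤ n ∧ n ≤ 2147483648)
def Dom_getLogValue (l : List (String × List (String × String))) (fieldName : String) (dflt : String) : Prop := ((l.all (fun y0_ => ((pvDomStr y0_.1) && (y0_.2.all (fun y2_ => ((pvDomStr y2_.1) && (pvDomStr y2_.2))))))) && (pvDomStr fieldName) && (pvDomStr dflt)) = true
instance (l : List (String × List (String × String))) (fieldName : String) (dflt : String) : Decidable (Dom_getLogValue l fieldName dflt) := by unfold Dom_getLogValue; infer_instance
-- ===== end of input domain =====

-- B replaces A's split("<br")-then-accumulate loop by a find/slice cursor tokenizer with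
-- partition('|') per segment, staged row/value lists, join and a separate first-non-empty search.
-- Objective: alternative algorithm, same asymptotic cost.

-- ===== PORT A =====
-- transliteration of the try/except lookup l['data'][fieldName]
def pvLookup (l : List (String × List (String × String))) (fieldName : String) (dflt : String) : String :=
  match (PySem.Dict.mk l).get? "data" with
  | none => dflt
  | some d =>
    match (PySem.Dict.mk d).get? fieldName with
    | none => dflt
    | some v => v

-- s.split(sep) for a non-empty sep (split? is none only for sep = "")
def pvSplit (s : String) (sep : String) : List String := (PySem.Str.split? s sep).getD [s]

-- the body of A's for-loop over result.split("<br"), state = (newresult, firstChange)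
def pvStepA (st : String × String) (seg : String) : String × String :=
  let c := pvSplit (PySem.Str.replace seg ">" "") "|"
  let nr := st.1 ++ "<tr><td>"
  let (nr2, fc) :=
    if c.length == 2 then
      (nr ++ PySem.Str.strip (PySem.List.pyGetD c 0 "") ++ "</td><td>" ++ PySem.Str.strip (PySem.List.pyGetD c 1 ""),
       if st.2 == "" then PySem.Str.strip (PySem.List.pyGetD c 1 "") else st.2)
    else
      (nr ++ "</td><td>" ++ PySem.Str.strip (PySem.List.pyGetD c 0 ""),
       if st.2 == "" then PySem.Str.strip (PySem.List.pyGetD c 0 "") else st.2)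
  (nr2 ++ "</td></tr>", fc)

def getLogValue (l : List (String × List (String × String))) (fieldName : String) (dflt : String) : String × String :=
  let result := pvLookup l fieldName dflt
  if fieldName == "logDateTime" then
    (PySem.Str.replace (PySem.Str.slice result (some 0) (some 19)) "T" " ", "")
  else if fieldName == "logComment" then
    (pvSplit result "<br").foldl pvStepA ("", "")
  else
    (result, "")

-- ===== PORT B =====
-- Python's t.partition(sep), ported by hand via find + slices (exact for the non-empty sep "|" used here)
def pvPartitionB (t : String) (sep : String) : String × String × String :=
  let i := PySem.Str.find t sep
  if i < 0 then (t, "", "")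
  else (PySem.Str.slice t none (some i), sep, PySem.Str.slice t (some (i + (sep.length : Int))) none)

-- per-segment body of B's while loop: returns (appended row, appended value)
def pvStepBSeg (seg : String) : String × String :=
  let p := pvPartitionB (PySem.Str.replace seg ">" "") "|"
  if p.2.1 == "|" && !(PySem.Str.isIn "|" p.2.2) then
    let v := PySem.Str.strip p.2.2
    ("<tr><td>" ++ PySem.Str.strip p.1 ++ "</td><td>" ++ v ++ "</td></tr>", v)
  else
    let v := PySem.Str.strip p.1
    ("<tr><td></td><td>" ++ v ++ "</td></tr>", v)

-- B's while-loop: cursor scan of s by find('<br')/slicing, accumulating rows and values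
def pvScanB (s : String) (rows values : List String) : List String × List String :=
  let i := PySem.Str.find s "<br"
  if _h : i < 0 then
    let rv := pvStepBSeg s
    (rows ++ [rv.1], values ++ [rv.2])
  else
    let seg := PySem.Str.slice s none (some i)
    let rv := pvStepBSeg seg
    pvScanB (PySem.Str.slice s (some (i + 3)) none) (rows ++ [rv.1]) (values ++ [rv.2])
termination_by s.toList.length
decreasing_by
  · have h0 : (0 : Int) ≤ PySem.Str.find s "<br" := by omega
    rw [PySem.Str.find_eq] at h0
    have hspec := PySem.Chars.find_spec h0
    have hl3 := hspec.1.length_le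
    rw [List.length_drop] at hl3
    have h3 : ("<br".toList).length = 3 := rfl
    rw [h3] at hl3
    have hto : (PySem.Str.slice s (some (PySem.Str.find s "<br" + 3)) none).toList
        = s.toList.drop ((PySem.Str.find s "<br" + 3).toNat) := by
      rw [PySem.Str.toList_slice, PySem.Chars.slice_eq_listSlice,
        PySem.List.slice_from _ (by rw [PySem.Str.find_eq]; omega)]
    rw [hto, List.length_drop, PySem.Str.find_eq]
    omega

def getLogValue_alt (l : List (String × List (String × String))) (fieldName : String) (dflt : String) : String × String :=
  let result := pvLookup l fieldName dflt
  if fieldName == "logDateTime" then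
    (PySem.Str.replace (PySem.Str.slice result (some 0) (some 19)) "T" " ", "")
  else if fieldName == "logComment" then
    let rv := pvScanB result [] []
    (PySem.Str.join "" rv.1, ((rv.2.find? (fun v => v != "")).getD ""))
  else
    (result, "")

-- ===== PRECONDITION & SPEC =====
def Spec_getLogValue (l : List (String × List (String × String))) (fieldName : String) (dflt : String) (out : String × String) : Prop := out = getLogValue_alt l fieldName dflt
instance (l : List (String × List (String × String))) (fieldName : String) (dflt : String) (out : String × String) : Decidable (Spec_getLogValue l fieldName dflt out) := by unfold Spec_getLogValue; infer_instance

-- ===== CLAIM =====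
def Claim_equal_getLogValue : Prop := ∀ (l : List (String × List (String × String))) (fieldName : String) (dflt : String), Dom_getLogValue l fieldName dflt → Spec_getLogValue l fieldName dflt (getLogValue l fieldName dflt)

-- ===== LEMMAS AND PROOFS =====

-- clean structural recursion equal to PySem.Chars.splitOn for a non-empty separator
def pvSp (sep : List Char) (l : List Char) : List (List Char) :=
  if _h : sep ≠ [] ∧ sep.isPrefixOf l then
    [] :: pvSp sep (l.drop sep.length)
  else
    match l with
    | [] => [[]]
    | c :: rest =>
      match pvSp sep rest with
      | [] => [[c]]
      | p :: ps => (c :: p) :: ps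
termination_by l.length
decreasing_by
  · have hpre : sep <+: l := by
      have := _h.2
      simpa [List.isPrefixOf_iff_prefix] using this
    have h1 : 1 ≤ sep.length := by
      cases sep with
      | nil => exact absurd rfl _h.1
      | cons a t => simp
    have h2 : sep.length ≤ l.length := hpre.length_le
    simp only [List.length_drop]
    omega
  · simp

lemma pvSp_ne_nil (sep l : List Char) : pvSp sep l ≠ [] := by
  unfold pvSp
  split
  · simp
  · cases l with
    | nil => simp
    | cons c rest => cases hh : pvSp sep rest <;> simp [hh]

-- splitOn.go computed through pvSp
lemma go_eq (sep : List Char) (hsep : sep ≠ []) :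
    ∀ (fuel : Nat) (l cur : List Char) (acc : List (List Char)), l.length ≤ fuel →
      PySem.Chars.splitOn.go sep fuel l cur acc
        = acc.reverse ++ (cur.reverse ++ (pvSp sep l).headI) :: (pvSp sep l).tail := by
  intro fuel
  induction fuel with
  | zero =>
    intro l cur acc hl
    have : l = [] := List.eq_nil_of_length_eq_zero (Nat.le_zero.mp hl)
    subst this
    have hpv : pvSp sep [] = [[]] := by
      unfold pvSp
      simp
    rw [hpv]
    simp [PySem.Chars.splitOn.go]
  | succ fuel ih =>
    intro l cur acc hl
    match l with
    | [] =>
      have hpv : pvSp sep [] = [[]] := by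
        unfold pvSp
        simp
      rw [hpv]
      simp [PySem.Chars.splitOn.go]
    | c :: rest =>
      by_cases hp : sep.isPrefixOf (c :: rest)
      · have hpv : pvSp sep (c :: rest) = [] :: pvSp sep ((c :: rest).drop sep.length) := by
          rw [pvSp]
          simp [hsep, hp]
        have hlen : ((c :: rest).drop sep.length).length ≤ fuel := by
          have h1 : 1 ≤ sep.length := by
            cases sep with
            | nil => exact absurd rfl hsep
            | cons a t => simp
          simp only [List.length_drop]
          simp at hl ⊢
          omega
        have hgo : PySem.Chars.splitOn.go sep (fuel + 1) (c :: rest) cur acc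
            = PySem.Chars.splitOn.go sep fuel ((c :: rest).drop sep.length) [] (cur.reverse :: acc) := by
          conv_lhs => rw [PySem.Chars.splitOn.go]
          simp [hp]
        rw [hgo, ih _ _ _ hlen, hpv]
        obtain ⟨p, ps, hps⟩ := List.exists_cons_of_ne_nil (pvSp_ne_nil sep ((c :: rest).drop sep.length))
        rw [hps]
        simp
      · have hgo : PySem.Chars.splitOn.go sep (fuel + 1) (c :: rest) cur acc
            = PySem.Chars.splitOn.go sep fuel rest (c :: cur) acc := by
          conv_lhs => rw [PySem.Chars.splitOn.go]
          simp [hp]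
        have hpv : pvSp sep (c :: rest)
            = (c :: (pvSp sep rest).headI) :: (pvSp sep rest).tail := by
          rw [pvSp]
          have : ¬ (sep ≠ [] ∧ sep.isPrefixOf (c :: rest)) := by
            rintro ⟨_, h2⟩; exact hp h2
          simp only [this, dite_false]
          obtain ⟨p, ps, hps⟩ := List.exists_cons_of_ne_nil (pvSp_ne_nil sep rest)
          rw [hps]
          simp
        have hlen : rest.length ≤ fuel := by simp at hl; omega
        rw [hgo, ih _ _ _ hlen, hpv]
        simp

lemma splitOn_eq_pvSp (sep l : List Char) (hsep : sep ≠ []) :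
    PySem.Chars.splitOn l sep = pvSp sep l := by
  unfold PySem.Chars.splitOn
  rw [go_eq sep hsep _ _ _ _ (by omega)]
  obtain ⟨p, ps, hps⟩ := List.exists_cons_of_ne_nil (pvSp_ne_nil sep l)
  rw [hps]
  simp

-- no occurrence: a single piece
lemma pvSp_of_not_infix (sep l : List Char) (h : ¬ sep <:+: l) : pvSp sep l = [l] := by
  induction l with
  | nil =>
    unfold pvSp
    simp
  | cons c rest ih =>
    have hp : ¬ sep.isPrefixOf (c :: rest) := by
      rw [List.isPrefixOf_iff_prefix]
      intro hpre
      exact h hpre.isInfix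
    have hrest : ¬ sep <:+: rest := fun hh => h (hh.trans (List.suffix_cons c rest).isInfix)
    rw [pvSp]
    have : ¬ (sep ≠ [] ∧ sep.isPrefixOf (c :: rest)) := by
      rintro ⟨_, h2⟩; exact hp h2
    simp only [this, dite_false]
    rw [ih hrest]

-- first occurrence at find: head piece + rest
lemma pvSp_of_find (sep l : List Char) (hsep : sep ≠ [])
    (h : 0 ≤ PySem.Chars.find l sep) :
    pvSp sep l = l.take (PySem.Chars.find l sep).toNat
      :: pvSp sep (l.drop ((PySem.Chars.find l sep).toNat + sep.length)) := by
  induction l with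
  | nil =>
    exfalso
    rw [PySem.Chars.find_nonneg_iff, List.infix_nil] at h
    exact hsep h
  | cons c rest ih =>
    have hspec := PySem.Chars.find_spec h
    by_cases hp : sep <+: (c :: rest)
    · have hj : (PySem.Chars.find (c :: rest) sep).toNat = 0 := by
        by_contra hne
        exact hspec.2 0 (Nat.pos_of_ne_zero hne) (by simpa using hp)
      rw [hj]
      rw [pvSp]
      have hcond : (sep ≠ [] ∧ sep.isPrefixOf (c :: rest)) :=
        ⟨hsep, List.isPrefixOf_iff_prefix.mpr hp⟩
      simp [hcond]
    · -- first occurrence strictly inside rest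
      set j := (PySem.Chars.find (c :: rest) sep).toNat with hjdef
      have hj1 : 1 ≤ j := by
        by_contra hlt
        have : j = 0 := by omega
        rw [this] at hspec
        exact hp (by simpa using hspec.1)
      have hdropj : (c :: rest).drop j = rest.drop (j - 1) := by
        obtain ⟨m, hm⟩ : ∃ m, j = m + 1 := ⟨j - 1, by omega⟩
        rw [hm]
        simp
      have hinf : sep <:+: rest := by
        have h1 := hspec.1
        rw [hdropj] at h1
        exact h1.isInfix.trans (List.drop_suffix _ _).isInfix
      have hfr : 0 ≤ PySem.Chars.find rest sep := (PySem.Chars.find_nonneg_iff _ _).mpr hinf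
      have hrspec := PySem.Chars.find_spec hfr
      set k := (PySem.Chars.find rest sep).toNat with hkdef
      have hkj : k = j - 1 := by
        have hle1 : k ≤ j - 1 := by
          by_contra hgt
          have h1 := hspec.1
          rw [hdropj] at h1
          exact hrspec.2 (j - 1) (by omega) h1
        have hle2 : j - 1 ≤ k := by
          by_contra hgt
          have h1 := hrspec.1
          have h2 : sep <+: (c :: rest).drop (k + 1) := by simpa using h1
          exact hspec.2 (k + 1) (by omega) h2
        omega
      have ihh := ih hfr
      rw [pvSp]
      have hcond : ¬ (sep ≠ [] ∧ sep.isPrefixOf (c :: rest)) := by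
        rintro ⟨_, h2⟩
        exact hp (List.isPrefixOf_iff_prefix.mp h2)
      simp only [hcond, dite_false]
      rw [ihh]
      have htake : (c :: rest).take j = c :: rest.take k := by
        obtain ⟨m, hm⟩ : ∃ m, j = m + 1 := ⟨j - 1, by omega⟩
        rw [hm]
        simp [hkj, hm]
      have hdrop : (c :: rest).drop (j + sep.length) = rest.drop (k + sep.length) := by
        have hj' : j + sep.length = (k + sep.length) + 1 := by omega
        rw [hj', List.drop_succ_cons]
      rw [htake, hdrop]

-- A's per-segment vocabulary: the split list, its value and its HTML row
def pvValB (c : List String) : String :=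
  if c.length == 2 then PySem.Str.strip (PySem.List.pyGetD c 1 "")
  else PySem.Str.strip (PySem.List.pyGetD c 0 "")

def pvRowB (c : List String) (v : String) : String :=
  "<tr><td>" ++ (if c.length == 2 then PySem.Str.strip (PySem.List.pyGetD c 0 "") ++ "</td><td>" else "</td><td>") ++ v ++ "</td></tr>"

def pvRowOf (seg : String) : String :=
  pvRowB (pvSplit (PySem.Str.replace seg ">" "") "|") (pvValB (pvSplit (PySem.Str.replace seg ">" "") "|"))
def pvValOf (seg : String) : String := pvValB (pvSplit (PySem.Str.replace seg ">" "") "|")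

lemma join_empty_cons (a : String) (rest : List String) :
    PySem.Str.join "" (a :: rest) = a ++ PySem.Str.join "" rest := by
  cases rest with
  | nil =>
    apply String.toList_injective
    simp [PySem.Str.toList_join, PySem.Chars.join_singleton, PySem.Chars.join_nil]
  | cons b l =>
    apply String.toList_injective
    simp [PySem.Str.toList_join, PySem.Chars.join_cons_cons]

lemma stepA_eq (st : String × String) (seg : String) :
    pvStepA st seg = (st.1 ++ pvRowOf seg, if st.2 == "" then pvValOf seg else st.2) := by
  unfold pvStepA pvRowOf pvRowB pvValOf pvValB
  by_cases hl : (pvSplit (PySem.Str.replace seg ">" "") "|").length = 2 <;>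
    by_cases hf : st.2 = "" <;>
      simp [hl, hf, String.append_assoc]

lemma foldlA_eq (segs : List String) (acc fc : String) :
    segs.foldl pvStepA (acc, fc) =
      (acc ++ PySem.Str.join "" (segs.map pvRowOf),
       if fc == "" then ((segs.map pvValOf).find? (fun v => v != "")).getD fc else fc) := by
  induction segs generalizing acc fc with
  | nil =>
    apply Prod.ext
    · apply String.toList_injective
      simp [PySem.Str.toList_join, PySem.Chars.join_nil]
    · simp only [List.map_nil, List.find?_nil, Option.getD_none]
      split_ifs <;> rfl
  | cons s rest ih =>
    rw [List.foldl_cons, stepA_eq, ih]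
    rw [List.map_cons, List.map_cons, join_empty_cons, List.find?_cons]
    apply Prod.ext
    · simp [String.append_assoc]
    · by_cases hfc : fc = ""
      · subst hfc
        by_cases hv : pvValOf s = ""
        · simp [hv]
        · have hb : (pvValOf s != "") = true := by simp [bne, hv]
          simp [hb, hv]
      · simp [hfc]

lemma pvSplit_eq (s sep : String) (hsep : sep.toList ≠ []) :
    pvSplit s sep = (pvSp sep.toList s.toList).map String.ofList := by
  unfold pvSplit
  have h1 : PySem.Chars.split? s.toList sep.toList
      = some (PySem.Chars.splitOn s.toList sep.toList) := by
    simp [PySem.Chars.split?, hsep]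
  have h2 : PySem.Str.split? s sep
      = some ((PySem.Chars.splitOn s.toList sep.toList).map String.ofList) := by
    simp [PySem.Str.split?, PySem.Chars.split?, hsep]
  rw [h2, splitOn_eq_pvSp _ _ hsep]
  rfl

lemma pyGetD_zero (a dflt : String) (l : List String) : PySem.List.pyGetD (a :: l) 0 dflt = a := by
  simp [PySem.List.pyGetD, PySem.List.pyGet?, PySem.List.pyIdx?]

lemma pyGetD_one (a b dflt : String) (l : List String) : PySem.List.pyGetD (a :: b :: l) 1 dflt = b := by
  simp [PySem.List.pyGetD, PySem.List.pyGet?, PySem.List.pyIdx?]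

lemma ofList_eq_of_toList {s : String} {l : List Char} (h : s.toList = l) : String.ofList l = s := by
  rw [← h, String.ofList_toList]

-- B's per-segment body computes A's row and value
lemma stepBSeg_eq (seg : String) : pvStepBSeg seg = (pvRowOf seg, pvValOf seg) := by
  unfold pvStepBSeg pvPartitionB pvRowOf pvValOf
  set t := PySem.Str.replace seg ">" "" with ht
  have hsplit : pvSplit t "|" = (pvSp ['|'] t.toList).map String.ofList := by
    have := pvSplit_eq t "|" (by decide)
    simpa using this
  have hfind : PySem.Str.find t "|" = PySem.Chars.find t.toList ['|'] := by
    rw [PySem.Str.find_eq]; rfl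
  have hlit : ("<tr><td>" : String) ++ "</td><td>" = "<tr><td></td><td>" := by decide
  by_cases hneg : PySem.Str.find t "|" < 0
  · have hm1 : PySem.Chars.find t.toList ['|'] = -1 := by
      have := PySem.Chars.neg_one_le_find t.toList ['|']
      rw [hfind] at hneg; omega
    have hni : ¬ ['|'] <:+: t.toList := (PySem.Chars.find_eq_neg_one_iff _ _).mp hm1
    have hc : pvSplit t "|" = [t] := by
      rw [hsplit, pvSp_of_not_infix _ _ hni]
      simp [String.ofList_toList]
    rw [hc]
    unfold pvRowB pvValB
    simp only [hneg, if_true, pyGetD_zero]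
    norm_num
    rw [if_neg (by decide), hlit]
  · have h0 : 0 ≤ PySem.Chars.find t.toList ['|'] := by rw [← hfind]; omega
    have hfs := PySem.Chars.find_spec h0
    set j := (PySem.Chars.find t.toList ['|']).toNat with hj
    have hlen1 : (("|" : String).length : Int) = 1 := by decide
    have hfj : PySem.Chars.find t.toList ['|'] = (j : Int) := (Int.toNat_of_nonneg h0).symm
    have hhead : (PySem.Str.slice t none (some (PySem.Str.find t "|"))).toList = t.toList.take j := by
      rw [PySem.Str.toList_slice, PySem.Chars.slice_eq_listSlice, hfind, hfj,
        PySem.List.slice_to_natCast]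
    have htail : (PySem.Str.slice t (some (PySem.Str.find t "|" + ("|" : String).length)) none).toList
        = t.toList.drop (j + 1) := by
      rw [PySem.Str.toList_slice, PySem.Chars.slice_eq_listSlice, hlen1, hfind, hfj,
        show ((j : Int) + 1) = ((j + 1 : Nat) : Int) from by push_cast; ring,
        PySem.List.slice_from_natCast]
    have hspt : pvSp ['|'] t.toList = t.toList.take j :: pvSp ['|'] (t.toList.drop (j + 1)) := by
      have := pvSp_of_find ['|'] t.toList (by decide) h0
      simpa using this
    simp only [hneg, if_false]
    by_cases hIn : PySem.Str.isIn "|" (PySem.Str.slice t (some (PySem.Str.find t "|" + ("|" : String).length)) none) = true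
    · -- exactly one bar: two pieces
      have hi2 : PySem.Chars.isIn ['|'] (t.toList.drop (j + 1)) = true := by
        have := hIn
        rw [PySem.Str.isIn_eq] at this
        rw [show ("|" : String).toList = ['|'] from by decide, htail] at this
        exact this
      have hinf2 : ['|'] <:+: t.toList.drop (j + 1) := by
        rw [← PySem.Chars.isIn_iff_infix]; exact hi2
      have h02 : 0 ≤ PySem.Chars.find (t.toList.drop (j + 1)) ['|'] :=
        (PySem.Chars.find_nonneg_iff _ _).mpr hinf2
      have hsp2 := pvSp_of_find ['|'] (t.toList.drop (j + 1)) (by decide) h02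
      have hlen3 : 3 ≤ (pvSplit t "|").length := by
        rw [hsplit, List.length_map, hspt, hsp2]
        have := pvSp_ne_nil ['|'] ((t.toList.drop (j + 1)).drop ((PySem.Chars.find (t.toList.drop (j + 1)) ['|']).toNat + (['|'] : List Char).length))
        cases hpp : pvSp ['|'] ((t.toList.drop (j + 1)).drop ((PySem.Chars.find (t.toList.drop (j + 1)) ['|']).toNat + (['|'] : List Char).length)) with
        | nil => exact absurd hpp this
        | cons x xs => simp
      have hne2 : ((pvSplit t "|").length == 2) = false := by
        have : (pvSplit t "|").length ≠ 2 := by omega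
        simpa using this
      have hc0 : PySem.List.pyGetD (pvSplit t "|") 0 "" = PySem.Str.slice t none (some (PySem.Str.find t "|")) := by
        rw [hsplit, hspt]
        simp only [List.map_cons, pyGetD_zero]
        exact ofList_eq_of_toList hhead
      unfold pvRowB pvValB
      simp only [hIn, Bool.not_true, Bool.and_false, hne2, hc0, Bool.false_eq_true, if_false]
      rw [hlit]
    · have hni2 : ¬ ['|'] <:+: t.toList.drop (j + 1) := by
        rw [← PySem.Chars.isIn_iff_infix]
        rw [PySem.Str.isIn_eq] at hIn
        rw [show ("|" : String).toList = ['|'] from by decide, htail] at hIn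
        simpa using hIn
      have hc : pvSplit t "|" = [PySem.Str.slice t none (some (PySem.Str.find t "|")),
          PySem.Str.slice t (some (PySem.Str.find t "|" + ("|" : String).length)) none] := by
        rw [hsplit, hspt, pvSp_of_not_infix _ _ hni2]
        simp only [List.map_cons, List.map_nil]
        rw [ofList_eq_of_toList hhead, ofList_eq_of_toList htail]
      rw [hc]
      unfold pvRowB pvValB
      have hIn' : PySem.Str.isIn "|" (PySem.Str.slice t (some (PySem.Str.find t "|" + ("|" : String).length)) none) = false := by
        simpa using hIn
      simp only [hIn', Bool.not_false, Bool.and_true, List.length_cons, List.length_nil,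
        pyGetD_zero, pyGetD_one]
      norm_num
      simp [String.append_assoc]

-- B's cursor scan over s collects exactly A's rows and values, in order
lemma scanB_eq (s : String) (rows values : List String) :
    pvScanB s rows values =
      (rows ++ (pvSplit s "<br").map pvRowOf, values ++ (pvSplit s "<br").map pvValOf) := by
  induction hn : s.toList.length using Nat.strong_induction_on generalizing s rows values with
  | _ n ih =>
  rw [pvScanB]
  have hfind : PySem.Str.find s "<br" = PySem.Chars.find s.toList "<br".toList := PySem.Str.find_eq s "<br"
  have hsplit : pvSplit s "<br" = (pvSp "<br".toList s.toList).map String.ofList :=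
    pvSplit_eq s "<br" (by decide)
  by_cases hneg : PySem.Str.find s "<br" < 0
  · have hm1 : PySem.Chars.find s.toList "<br".toList = -1 := by
      have := PySem.Chars.neg_one_le_find s.toList "<br".toList
      omega
    have hni : ¬ "<br".toList <:+: s.toList := (PySem.Chars.find_eq_neg_one_iff _ _).mp hm1
    have hc : pvSplit s "<br" = [s] := by
      rw [hsplit, pvSp_of_not_infix _ _ hni]
      simp [String.ofList_toList]
    simp only [hneg, dif_pos, hc, List.map_cons, List.map_nil, stepBSeg_eq]
  · have h0 : 0 ≤ PySem.Chars.find s.toList "<br".toList := by omega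
    have hfs := PySem.Chars.find_spec h0
    set j := (PySem.Chars.find s.toList "<br".toList).toNat with hj
    have hfj : PySem.Chars.find s.toList "<br".toList = (j : Int) := (Int.toNat_of_nonneg h0).symm
    have hhead : (PySem.Str.slice s none (some (PySem.Str.find s "<br"))).toList = s.toList.take j := by
      rw [PySem.Str.toList_slice, PySem.Chars.slice_eq_listSlice, hfind, hfj,
        PySem.List.slice_to_natCast]
    have htail : (PySem.Str.slice s (some (PySem.Str.find s "<br" + 3)) none).toList
        = s.toList.drop (j + 3) := by
      rw [PySem.Str.toList_slice, PySem.Chars.slice_eq_listSlice, hfind, hfj,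
        show ((j : Int) + 3) = ((j + 3 : Nat) : Int) from by push_cast; ring,
        PySem.List.slice_from_natCast]
    have hlt : (PySem.Str.slice s (some (PySem.Str.find s "<br" + 3)) none).toList.length < n := by
      rw [htail, List.length_drop]
      have hle := hfs.1.length_le
      rw [List.length_drop] at hle
      have h3 : ("<br".toList).length = 3 := rfl
      rw [h3] at hle
      omega
    have hspt : pvSp "<br".toList s.toList
        = s.toList.take j :: pvSp "<br".toList (s.toList.drop (j + 3)) := by
      have := pvSp_of_find "<br".toList s.toList (by decide) h0
      simpa using this
    have hsplit2 : pvSplit (PySem.Str.slice s (some (PySem.Str.find s "<br" + 3)) none) "<br"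
        = (pvSp "<br".toList (s.toList.drop (j + 3))).map String.ofList := by
      rw [pvSplit_eq _ "<br" (by decide), htail]
    simp only [hneg, dif_neg, not_false_iff]
    rw [ih _ hlt _ _ _ rfl]
    rw [hsplit, hspt]
    simp only [List.map_cons, stepBSeg_eq]
    rw [ofList_eq_of_toList hhead]
    rw [hsplit2]
    simp [List.append_assoc]

-- ===== VERDICT =====
theorem getLogValue_spec : Claim_equal_getLogValue := by
  intro l fieldName dflt _
  unfold Spec_getLogValue getLogValue getLogValue_alt
  by_cases h1 : fieldName == "logDateTime"
  · simp only [h1, if_true]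
  · by_cases h2 : fieldName == "logComment"
    · simp only [h1, h2, if_true, Bool.false_eq_true, if_false]
      rw [foldlA_eq, scanB_eq]
      simp
    · simp only [h1, h2, Bool.false_eq_true, if_false]
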